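-- pv_equiv track=rewrite | github.com/lengfeiyan/stockorder | stock/views.py | filterStock
-- ===== SOURCE A (Python) =====
-- def filterStock(stockFilter, stockInfo):
--     result = [False] * len(stockFilter)
--     for i in range(len(stockFilter)):
--         if stockFilter[i]:
--             if stockFilter[i] == stockInfo[i]:
--                 result[i] =  True
--             else:
--                 result[i] = False
--         else:
--             result[i] = True
--     if False in result:
--         return False
--     else:
--         return True
-- ===== SOURCE B (Python) =====
-- def filterStock(stockFilter, stockInfo):
--     # Project both lists onto the constrained positions (non-empty filter
--     # entries) and decide by a single sequence equality instead of per-index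
--     # boolean tests.
--     active = [i for i in range(len(stockFilter)) if stockFilter[i]]
--     return [stockFilter[i] for i in active] == [stockInfo[i] for i in active]
-- ===== Notes on version B (the rewrite author's own statement) =====
-- stated objective: alternative
-- what changed: A builds a per-index boolean table and scans it for False; B instead computes the list of constrained indices and decides by one sequence equality between the filter values and the stock values projected onto those indices - no boolean table or per-index comparison result is ever materialised.
import Mathlib
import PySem

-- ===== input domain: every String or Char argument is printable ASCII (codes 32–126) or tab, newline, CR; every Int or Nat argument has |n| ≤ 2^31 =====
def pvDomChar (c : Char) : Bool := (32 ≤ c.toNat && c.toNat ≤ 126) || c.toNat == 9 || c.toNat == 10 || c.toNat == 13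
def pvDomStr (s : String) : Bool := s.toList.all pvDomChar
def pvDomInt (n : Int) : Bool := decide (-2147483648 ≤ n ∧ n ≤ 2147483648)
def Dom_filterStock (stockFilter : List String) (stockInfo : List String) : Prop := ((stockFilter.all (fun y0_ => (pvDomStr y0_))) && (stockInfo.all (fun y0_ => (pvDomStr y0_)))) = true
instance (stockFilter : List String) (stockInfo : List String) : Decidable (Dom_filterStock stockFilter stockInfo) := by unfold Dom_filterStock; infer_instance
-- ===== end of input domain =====

-- B replaces A's boolean table + scan by projecting both lists onto the constrained
-- indices and deciding with one sequence equality (objective: alternative).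


-- ===== PORT A =====
-- A: build a full boolean table result over every index, then test 'False in result'.
def filterStock (stockFilter : List String) (stockInfo : List String) : Bool :=
  let result := List.replicate stockFilter.length false
  let result := (PySem.List.pyRange 0 stockFilter.length 1).foldl
    (fun result i =>
      let fi := (PySem.List.pyGet? stockFilter i).getD ""
      if fi ≠ "" then
        if PySem.List.pyGet? stockFilter i = PySem.List.pyGet? stockInfo i then
          result.set i.toNat true
        else
          result.set i.toNat false
      else
        result.set i.toNat true) result
  if result.contains false then false else true

-- ===== PORT B =====
-- B: project both lists onto the constrained indices, compare the projections as lists.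
def filterStock_alt (stockFilter : List String) (stockInfo : List String) : Bool :=
  let active := (PySem.List.pyRange 0 stockFilter.length 1).filter
    (fun i => (PySem.List.pyGet? stockFilter i).getD "" != "")
  decide (active.map (fun i => (PySem.List.pyGet? stockFilter i).getD "")
        = active.map (fun i => (PySem.List.pyGet? stockInfo i).getD ""))

-- ===== PRECONDITION & SPEC =====
-- Pre_ excludes exactly the inputs where A raises IndexError: a non-empty filter
-- entry at an index with no corresponding stockInfo entry.
def Pre_filterStock (stockFilter : List String) (stockInfo : List String) : Prop :=
  ∀ i : Nat, i < stockFilter.length → stockFilter.getD i "" ≠ "" → i < stockInfo.length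
instance (stockFilter : List String) (stockInfo : List String) : Decidable (Pre_filterStock stockFilter stockInfo) := by unfold Pre_filterStock; infer_instance
def pvWitness_filterStock : List String × List String := (["a", ""], ["a"])
def Spec_filterStock (stockFilter : List String) (stockInfo : List String) (out : Bool) : Prop := out = filterStock_alt stockFilter stockInfo
instance (stockFilter : List String) (stockInfo : List String) (out : Bool) : Decidable (Spec_filterStock stockFilter stockInfo out) := by unfold Spec_filterStock; infer_instance

-- ===== CLAIM (what is proved, stated in full; the proofs are below) =====
def Claim_equal_filterStock : Prop := ∀ (stockFilter : List String) (stockInfo : List String), Dom_filterStock stockFilter stockInfo → Pre_filterStock stockFilter stockInfo → Spec_filterStock stockFilter stockInfo (filterStock stockFilter stockInfo)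

-- ===== LEMMAS AND PROOFS =====

-- the per-index boolean A computes
def pvQ (stockFilter stockInfo : List String) (i : Int) : Bool :=
  let fi := (PySem.List.pyGet? stockFilter i).getD ""
  if fi ≠ "" then
    if PySem.List.pyGet? stockFilter i = PySem.List.pyGet? stockInfo i then true else false
  else true

lemma pv_set_append {l : List Bool} {x b : Bool} {i : Nat} (h : i < l.length) :
    (l ++ [x]).set i b = l.set i b ++ [x] := by
  rw [List.set_append_left _ _ h]

lemma pv_foldl_set_append (f g : List String) :
    ∀ (l : List Int) (res : List Bool) (x : Bool),
      (∀ i ∈ l, i.toNat < res.length) →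
      l.foldl (fun r i => r.set i.toNat (pvQ f g i)) (res ++ [x])
        = l.foldl (fun r i => r.set i.toNat (pvQ f g i)) res ++ [x] := by
  intro l
  induction l with
  | nil => intro res x _; rfl
  | cons a t ih =>
    intro res x h
    simp only [List.foldl_cons]
    rw [pv_set_append (h a (by simp))]
    exact ih _ _ (by intro i hi; simpa using h i (by simp [hi]))

lemma pv_table (f g : List String) : ∀ n : Nat,
    (PySem.List.pyRange 0 n 1).foldl (fun r i => r.set i.toNat (pvQ f g i)) (List.replicate n false)
      = (List.range n).map (fun k : Nat => pvQ f g (k : Int)) := by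
  intro n
  induction n with
  | zero => simp
  | succ n ih =>
    have hr : PySem.List.pyRange 0 ((n : Int) + 1) 1
        = PySem.List.pyRange 0 n 1 ++ [(n : Int)] :=
      PySem.List.pyRange_one_succ_right (by positivity)
    have hm : ∀ i ∈ PySem.List.pyRange 0 (n : Int) 1, i.toNat < n := by
      intro i hi
      have := (PySem.List.mem_pyRange_one).1 hi
      omega
    calc (PySem.List.pyRange 0 ((n : Nat) + 1 : Nat) 1).foldl
            (fun r i => r.set i.toNat (pvQ f g i)) (List.replicate (n + 1) false)
        = ((PySem.List.pyRange 0 (n : Int) 1 ++ [(n : Int)]).foldl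
            (fun r i => r.set i.toNat (pvQ f g i)) (List.replicate n false ++ [false])) := by
          rw [← hr]
          norm_num [List.replicate_succ']
      _ = ((PySem.List.pyRange 0 (n : Int) 1).foldl
            (fun r i => r.set i.toNat (pvQ f g i)) (List.replicate n false ++ [false])).set
            ((n : Int)).toNat (pvQ f g n) := by
          rw [List.foldl_append]; rfl
      _ = ((List.range n).map (fun k : Nat => pvQ f g (k : Int)) ++ [false]).set n (pvQ f g n) := by
          rw [pv_foldl_set_append f g _ _ _ (by simpa using hm), ih]; simp
      _ = (List.range (n + 1)).map (fun k : Nat => pvQ f g (k : Int)) := by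
          have hlen : ((List.range n).map (fun k : Nat => pvQ f g (k : Int))).length = n := by
            simp
          rw [List.set_append_right _ _ (by omega)]
          simp [List.range_succ]

lemma pv_step_eq (f g : List String) :
    (fun (result : List Bool) (i : Int) =>
      let fi := (PySem.List.pyGet? f i).getD ""
      if fi ≠ "" then
        if PySem.List.pyGet? f i = PySem.List.pyGet? g i then
          result.set i.toNat true
        else
          result.set i.toNat false
      else
        result.set i.toNat true)
    = (fun (r : List Bool) (i : Int) => r.set i.toNat (pvQ f g i)) := by
  funext r i
  simp only [pvQ]
  split_ifs <;> rfl

lemma pv_if_contains (L : List Bool) : (if L.contains false then false else true) = L.all id := by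
  induction L with
  | nil => rfl
  | cons a t ih => cases a <;> simp_all

-- pointwise bridge: for an in-range index, A's boolean pvQ is true iff the two
-- projected values agree (what B's list equality tests at that position)
lemma pv_point (f g : List String) (i : Int) (h0 : 0 ≤ i) (h1 : i < (f.length : Int)) :
    (pvQ f g i = true) ↔
      ((PySem.List.pyGet? f i).getD "" ≠ "" →
        (PySem.List.pyGet? f i).getD "" = (PySem.List.pyGet? g i).getD "") := by
  have hlt : i.toNat < f.length := by omega
  have hf : PySem.List.pyGet? f i = some (f[i.toNat]'hlt) :=
    PySem.List.pyGet?_eq_some_getElem _ h0 (by exact_mod_cast h1)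
  simp only [pvQ, hf, Option.getD_some]
  by_cases hne : f[i.toNat]'hlt = ""
  · simp [hne]
  · cases hg : PySem.List.pyGet? g i <;> simp [hne]

-- B equals "pvQ holds on every active index" (the projections are maps over the
-- same active list, so list equality is pointwise equality there).
lemma pv_alt_eq (f g : List String) :
    filterStock_alt f g = (PySem.List.pyRange 0 f.length 1).all (fun i => pvQ f g i) := by
  unfold filterStock_alt
  rw [Bool.eq_iff_iff, decide_eq_true_iff, List.map_inj_left]
  simp only [List.all_eq_true, List.mem_filter, bne_iff_ne, ne_eq]
  constructor
  · intro h i hi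
    have hb := (PySem.List.mem_pyRange_one).1 hi
    rw [pv_point f g i hb.1 hb.2]
    intro hne
    exact h i ⟨hi, hne⟩
  · intro h i hmem
    obtain ⟨hi, hne⟩ := hmem
    have hb := (PySem.List.mem_pyRange_one).1 hi
    exact (pv_point f g i hb.1 hb.2).1 (h i hi) hne

lemma pv_all_map {α β : Type} (L : List α) (c : α → β) (q : β → Bool) :
    ((L.map c).all q) = L.all (fun x => q (c x)) := by
  induction L with
  | nil => rfl
  | cons a t ih => simp [ih]

-- ===== VERDICT (by name: the statement is the Claim_ definition above) =====
theorem filterStock_spec : Claim_equal_filterStock := by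
  intro f g _ _
  unfold Spec_filterStock filterStock
  simp only [pv_step_eq f g]
  rw [pv_table f g f.length, pv_if_contains, pv_alt_eq, pv_all_map]
  rw [Bool.eq_iff_iff]
  simp only [List.all_eq_true, List.mem_range, PySem.List.mem_pyRange_one, id_eq]
  constructor
  · intro h i hi
    have hk : i.toNat < f.length := by omega
    have := h i.toNat hk
    rwa [Int.toNat_of_nonneg hi.1] at this
  · intro h k hk
    exact h (k : Int) ⟨Int.natCast_nonneg k, by exact_mod_cast hk⟩
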